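-- pv_equiv track=rewrite | github.com/Arescoreadmin/fg-core | scripts/patch_key_lifecycle_tests.py | insert_into_class
-- ===== SOURCE A (Python) =====
-- def insert_into_class(content: str, class_name: str, snippet: str) -> str:
--     if snippet.strip() in content:
--         return content  # already inserted
--
--     lines = content.splitlines()
--     new_lines = []
--     inside_class = False
--     inserted = False
--
--     for i, line in enumerate(lines):
--         new_lines.append(line)
--
--         if line.startswith(f"class {class_name}"):
--             inside_class = True
--             continue
--
--         if inside_class:
--             # detect next class or end of file
--             if line.startswith("class ") and not line.startswith(f"class {class_name}"):
--                 if not inserted: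
--                     new_lines.insert(len(new_lines) - 1, snippet)
--                     inserted = True
--                 inside_class = False
--
--     # if class is last in file
--     if inside_class and not inserted:
--         new_lines.append(snippet)
--
--     return "\n".join(new_lines)
-- ===== SOURCE B (Python) =====
-- def _find_index(xs, p):
--     for idx, x in enumerate(xs):
--         if p(x):
--             return idx
--     return None
--
--
-- def insert_into_class(content: str, class_name: str, snippet: str) -> str:
--     if snippet.strip() in content:
--         return content  # already inserted
--
--     lines = content.splitlines()
--     prefix = "class " + class_name
--     i = _find_index(lines, lambda l: l.startswith(prefix))
--     if i is None:
--         return "\n".join(lines)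
--
--     k = _find_index(lines[i + 1:],
--                     lambda l: l.startswith("class ") and not l.startswith(prefix))
--     if k is None:
--         return "\n".join(lines + [snippet])
--
--     j = i + 1 + k
--     return "\n".join(lines[:j] + [snippet] + lines[j:])
-- ===== Notes on version B (the rewrite author's own statement) =====
-- stated objective: simpler
-- what changed: Replaces A's single stateful scan with inside_class/inserted flags and a mid-list insert by two plain index searches (first 'class <name>' line, then the next other 'class ' line after it) followed by one slice-based insertion.
import Mathlib
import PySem

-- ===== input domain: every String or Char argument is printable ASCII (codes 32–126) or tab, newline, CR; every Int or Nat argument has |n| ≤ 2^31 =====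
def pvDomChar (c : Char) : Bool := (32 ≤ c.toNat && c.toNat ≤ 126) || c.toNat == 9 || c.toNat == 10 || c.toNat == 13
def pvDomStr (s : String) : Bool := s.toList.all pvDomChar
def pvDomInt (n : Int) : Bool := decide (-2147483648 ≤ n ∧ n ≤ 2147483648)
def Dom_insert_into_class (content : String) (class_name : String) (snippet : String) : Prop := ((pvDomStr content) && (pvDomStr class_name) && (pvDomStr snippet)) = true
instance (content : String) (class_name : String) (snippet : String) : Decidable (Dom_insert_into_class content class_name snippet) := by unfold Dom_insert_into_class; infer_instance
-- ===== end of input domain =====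

-- B replaces A's single stateful flag-driven scan by two index searches (first target-class
-- line, then next other-class line) plus a slice-based insertion; objective: simpler.

-- ===== PORT A =====
-- the body of A's for-loop, over the state (new_lines, inside_class, inserted)
def pvStepA (class_name snippet : String) (s : List String × Bool × Bool) (il : Int × String) : List String × Bool × Bool :=
  let new_lines := s.1 ++ [il.2]
  if PySem.Str.startswith il.2 ("class " ++ class_name) then (new_lines, true, s.2.2)
  else if s.2.1 then
    if PySem.Str.startswith il.2 "class " && !(PySem.Str.startswith il.2 ("class " ++ class_name)) then
      if !s.2.2 then (PySem.List.insert new_lines ((new_lines.length : Int) - 1) snippet, false, true)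
      else (new_lines, false, s.2.2)
    else (new_lines, s.2.1, s.2.2)
  else (new_lines, s.2.1, s.2.2)

def insert_into_class (content : String) (class_name : String) (snippet : String) : String :=
  if PySem.Str.isIn (PySem.Str.strip snippet) content then content
  else
    let lines := PySem.Str.splitlines content
    let st := (PySem.List.enumerate lines).foldl (pvStepA class_name snippet) ([], false, false)
    let new_lines := if st.2.1 && !st.2.2 then st.1 ++ [snippet] else st.1
    PySem.Str.join "\n" new_lines

-- ===== PORT B =====
-- _find_index from Source B
def pvFindIndex (p : String → Bool) : List String → Option Nat
  | [] => none
  | x :: xs => if p x then some 0 else (pvFindIndex p xs).map (· + 1)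

def insert_into_class_alt (content : String) (class_name : String) (snippet : String) : String :=
  if PySem.Str.isIn (PySem.Str.strip snippet) content then content
  else
    let lines := PySem.Str.splitlines content
    let pfx := "class " ++ class_name
    match pvFindIndex (fun l => PySem.Str.startswith l pfx) lines with
    | none => PySem.Str.join "\n" lines
    | some i =>
      match pvFindIndex (fun l => PySem.Str.startswith l "class " && !(PySem.Str.startswith l pfx)) (lines.drop (i + 1)) with
      | none => PySem.Str.join "\n" (lines ++ [snippet])
      | some k =>
        let j := i + 1 + k
        PySem.Str.join "\n" (lines.take j ++ [snippet] ++ lines.drop j)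

-- ===== PRECONDITION & SPEC =====
def Spec_insert_into_class (content : String) (class_name : String) (snippet : String) (out : String) : Prop := out = insert_into_class_alt content class_name snippet
instance (content : String) (class_name : String) (snippet : String) (out : String) : Decidable (Spec_insert_into_class content class_name snippet out) := by unfold Spec_insert_into_class; infer_instance

-- ===== CLAIM (what is proved, stated in full; the proofs are below) =====
def Claim_equal_insert_into_class : Prop := ∀ (content : String) (class_name : String) (snippet : String), Dom_insert_into_class content class_name snippet → Spec_insert_into_class content class_name snippet (insert_into_class content class_name snippet)

-- ===== LEMMAS AND PROOFS =====

-- single-step characterisations of A's loop body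
theorem pvStep_irrel (cn sn : String) (a : List String × Bool × Bool) (n : Int) (l : String) :
    pvStepA cn sn a (n, l) = pvStepA cn sn a (0, l) := rfl

theorem pvStep_target (cn sn x : String) (acc : List String) (ins ib : Bool)
    (h : PySem.Str.startswith x ("class " ++ cn) = true) :
    pvStepA cn sn (acc, ins, ib) (0, x) = (acc ++ [x], true, ib) := by
  simp only [pvStepA]; rw [if_pos h]

theorem pvStep_outside (cn sn x : String) (acc : List String) (ib : Bool)
    (h : PySem.Str.startswith x ("class " ++ cn) = false) :
    pvStepA cn sn (acc, false, ib) (0, x) = (acc ++ [x], false, ib) := by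
  simp only [pvStepA, h]; simp

theorem pvStep_inside_skip (cn sn x : String) (acc : List String) (ib : Bool)
    (hP : PySem.Str.startswith x ("class " ++ cn) = false)
    (hQ : (PySem.Str.startswith x "class " && !(PySem.Str.startswith x ("class " ++ cn))) = false) :
    pvStepA cn sn (acc, true, ib) (0, x) = (acc ++ [x], true, ib) := by
  have hC : PySem.Str.startswith x "class " = false := by
    rw [hP] at hQ; simpa using hQ
  simp only [pvStepA, hP, hC]; simp

-- inserting at position len-1 puts the snippet just before the last appended line
theorem pvInsertPenultimate (acc : List String) (c sn : String) :
    PySem.List.insert (acc ++ [c]) (((acc ++ [c]).length : Int) - 1) sn = acc ++ [sn, c] := by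
  have h1 : ((acc ++ [c]).length : Int) - 1 = (acc.length : Int) := by simp
  rw [h1, PySem.List.insert_natCast (acc ++ [c]) acc.length sn (by simp)]
  simp

theorem pvStep_insert (cn sn x : String) (acc : List String)
    (hQ : (PySem.Str.startswith x "class " && !(PySem.Str.startswith x ("class " ++ cn))) = true) :
    pvStepA cn sn (acc, true, false) (0, x) = (acc ++ [sn, x], false, true) := by
  have h2 := hQ
  simp only [Bool.and_eq_true, Bool.not_eq_true'] at h2
  obtain ⟨hC, hP⟩ := h2
  simp only [pvStepA, hP, hC]
  rw [pvInsertPenultimate]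
  simp

theorem pvStep_inside_inserted (cn sn x : String) (acc : List String)
    (hP : PySem.Str.startswith x ("class " ++ cn) = false)
    (hQ : (PySem.Str.startswith x "class " && !(PySem.Str.startswith x ("class " ++ cn))) = true) :
    pvStepA cn sn (acc, true, true) (0, x) = (acc ++ [x], false, true) := by
  have h2 := hQ
  simp only [Bool.and_eq_true, Bool.not_eq_true'] at h2
  simp only [pvStepA, hP, h2.1]; simp

-- A's step ignores the enumerate index, so the fold over the enumeration is a fold over the lines
theorem pvFoldEnum (cn sn : String) (xs : List String) (s : Int) (acc : List String × Bool × Bool) :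
    (PySem.List.enumerate xs s).foldl (pvStepA cn sn) acc
      = xs.foldl (fun a l => pvStepA cn sn a (0, l)) acc := by
  induction xs generalizing s acc with
  | nil => simp [PySem.List.enumerate_nil]
  | cons x xs ih =>
    rw [PySem.List.enumerate_cons, List.foldl_cons, List.foldl_cons, pvStep_irrel, ih]

theorem pvFindIndex_none_iff (p : String → Bool) (xs : List String) :
    pvFindIndex p xs = none ↔ ∀ x ∈ xs, p x = false := by
  induction xs with
  | nil => simp [pvFindIndex]
  | cons x xs ih =>
    by_cases h : p x
    · simp [pvFindIndex, h]
    · simp only [pvFindIndex, h, if_false, Option.map_eq_none_iff, Bool.false_eq_true, ih]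
      constructor
      · intro hall y hy
        rcases List.mem_cons.mp hy with h1 | h2
        · simpa [h1] using h
        · exact hall y h2
      · intro hall y hy; exact hall y (by simp [hy])

theorem pvFindIndex_some (p : String → Bool) (xs : List String) (i : Nat)
    (h : pvFindIndex p xs = some i) :
    ∃ u t v, xs = u ++ t :: v ∧ u.length = i ∧ (∀ x ∈ u, p x = false) ∧ p t = true := by
  induction xs generalizing i with
  | nil => simp [pvFindIndex] at h
  | cons x xs ih =>
    by_cases hx : p x
    · simp [pvFindIndex, hx] at h
      exact ⟨[], x, xs, by simp, by simp [← h], by simp, hx⟩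
    · simp [pvFindIndex, hx] at h
      obtain ⟨j, hj, hji⟩ := h
      obtain ⟨u, t, v, hxs, hlen, hu, ht⟩ := ih j hj
      refine ⟨x :: u, t, v, by simp [hxs], by simp [hlen, hji], ?_, ht⟩
      intro y hy
      rcases List.mem_cons.mp hy with h1 | h2
      · simpa [h1] using hx
      · exact hu y h2

-- phase 0, no target anywhere: lines pass through unchanged
theorem pvLoopSeekNone (cn sn : String) (v acc : List String) (ins : Bool)
    (h : ∀ l ∈ v, PySem.Str.startswith l ("class " ++ cn) = false) :
    v.foldl (fun a l => pvStepA cn sn a (0, l)) (acc, false, ins) = (acc ++ v, false, ins) := by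
  induction v generalizing acc with
  | nil => simp
  | cons x xs ih =>
    rw [List.foldl_cons, pvStep_outside cn sn x acc ins (h x (by simp)),
      ih (acc ++ [x]) (fun l hl => h l (by simp [hl]))]
    simp

-- phase 0: lines up to the first target-class line pass through, then inside_class is set
theorem pvLoopSeek (cn sn : String) (u : List String) (t : String) (v acc : List String) (ins : Bool)
    (hu : ∀ l ∈ u, PySem.Str.startswith l ("class " ++ cn) = false)
    (ht : PySem.Str.startswith t ("class " ++ cn) = true) :
    (u ++ t :: v).foldl (fun a l => pvStepA cn sn a (0, l)) (acc, false, ins)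
      = v.foldl (fun a l => pvStepA cn sn a (0, l)) (acc ++ u ++ [t], true, ins) := by
  induction u generalizing acc with
  | nil =>
    rw [List.nil_append, List.foldl_cons, pvStep_target cn sn t acc false ins ht]
    simp
  | cons x xs ih =>
    rw [List.cons_append, List.foldl_cons, pvStep_outside cn sn x acc ins (hu x (by simp)),
      ih (acc ++ [x]) (fun l hl => hu l (by simp [hl]))]
    have : acc ++ [x] ++ xs = acc ++ x :: xs := by simp
    rw [this]

-- phase 1, no boundary: inside the target class with nothing inserted, lines pass through
theorem pvLoopInsideNone (cn sn : String) (v acc : List String)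
    (h : ∀ l ∈ v, (PySem.Str.startswith l "class " && !(PySem.Str.startswith l ("class " ++ cn))) = false) :
    v.foldl (fun a l => pvStepA cn sn a (0, l)) (acc, true, false) = (acc ++ v, true, false) := by
  induction v generalizing acc with
  | nil => simp
  | cons x xs ih =>
    by_cases hp : PySem.Str.startswith x ("class " ++ cn) = true
    · rw [List.foldl_cons, pvStep_target cn sn x acc true false hp,
        ih (acc ++ [x]) (fun l hl => h l (by simp [hl]))]
      simp
    · rw [List.foldl_cons,
        pvStep_inside_skip cn sn x acc false (eq_false_of_ne_true hp) (h x (by simp)),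
        ih (acc ++ [x]) (fun l hl => h l (by simp [hl]))]
      simp

-- phase 1, boundary found: the snippet goes in right before the next class line
theorem pvLoopInsideFound (cn sn : String) (w : List String) (c : String) (z acc : List String)
    (hw : ∀ l ∈ w, (PySem.Str.startswith l "class " && !(PySem.Str.startswith l ("class " ++ cn))) = false)
    (hc : (PySem.Str.startswith c "class " && !(PySem.Str.startswith c ("class " ++ cn))) = true) :
    (w ++ c :: z).foldl (fun a l => pvStepA cn sn a (0, l)) (acc, true, false)
      = z.foldl (fun a l => pvStepA cn sn a (0, l)) (acc ++ w ++ [sn, c], false, true) := by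
  induction w generalizing acc with
  | nil =>
    rw [List.nil_append, List.foldl_cons, pvStep_insert cn sn c acc hc]
    simp
  | cons x xs ih =>
    by_cases hp : PySem.Str.startswith x ("class " ++ cn) = true
    · rw [List.cons_append, List.foldl_cons, pvStep_target cn sn x acc true false hp,
        ih (acc ++ [x]) (fun l hl => hw l (by simp [hl]))]
      have : acc ++ [x] ++ xs = acc ++ x :: xs := by simp
      rw [this]
    · rw [List.cons_append, List.foldl_cons,
        pvStep_inside_skip cn sn x acc false (eq_false_of_ne_true hp) (hw x (by simp)),
        ih (acc ++ [x]) (fun l hl => hw l (by simp [hl]))]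
      have : acc ++ [x] ++ xs = acc ++ x :: xs := by simp
      rw [this]

-- phase 2: once inserted, the tail only accumulates and inserted stays true
theorem pvLoopDone (cn sn : String) (z : List String) (acc : List String) (b : Bool) :
    (z.foldl (fun a l => pvStepA cn sn a (0, l)) (acc, b, true)).1 = acc ++ z ∧
    (z.foldl (fun a l => pvStepA cn sn a (0, l)) (acc, b, true)).2.2 = true := by
  induction z generalizing acc b with
  | nil => simp
  | cons x xs ih =>
    have fin : ∀ b', (xs.foldl (fun a l => pvStepA cn sn a (0, l)) (acc ++ [x], b', true)).1 = acc ++ x :: xs ∧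
        (xs.foldl (fun a l => pvStepA cn sn a (0, l)) (acc ++ [x], b', true)).2.2 = true := by
      intro b'
      obtain ⟨h1, h2⟩ := ih (acc ++ [x]) b'
      exact ⟨by rw [h1]; simp, h2⟩
    by_cases hp : PySem.Str.startswith x ("class " ++ cn) = true
    · rw [List.foldl_cons, pvStep_target cn sn x acc b true hp]; exact fin true
    · rcases b with _ | _
      · rw [List.foldl_cons, pvStep_outside cn sn x acc true (eq_false_of_ne_true hp)]
        exact fin false
      · by_cases hq : (PySem.Str.startswith x "class " && !(PySem.Str.startswith x ("class " ++ cn))) = true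
        · rw [List.foldl_cons, pvStep_inside_inserted cn sn x acc (eq_false_of_ne_true hp) hq]
          exact fin false
        · rw [List.foldl_cons,
            pvStep_inside_skip cn sn x acc true (eq_false_of_ne_true hp) (eq_false_of_ne_true hq)]
          exact fin true

-- the whole computation after the substring guard, on the split lines
theorem pvMain (cn sn : String) (lines : List String) :
    PySem.Str.join "\n"
      (if ((PySem.List.enumerate lines).foldl (pvStepA cn sn) ([], false, false)).2.1 &&
          !((PySem.List.enumerate lines).foldl (pvStepA cn sn) ([], false, false)).2.2 then
        ((PySem.List.enumerate lines).foldl (pvStepA cn sn) ([], false, false)).1 ++ [sn]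
      else ((PySem.List.enumerate lines).foldl (pvStepA cn sn) ([], false, false)).1)
    = (match pvFindIndex (fun l => PySem.Str.startswith l ("class " ++ cn)) lines with
       | none => PySem.Str.join "\n" lines
       | some i =>
         match pvFindIndex
             (fun l => PySem.Str.startswith l "class " && !(PySem.Str.startswith l ("class " ++ cn)))
             (lines.drop (i + 1)) with
         | none => PySem.Str.join "\n" (lines ++ [sn])
         | some k => PySem.Str.join "\n" (lines.take (i + 1 + k) ++ [sn] ++ lines.drop (i + 1 + k))) := by
  rw [pvFoldEnum]
  rcases hP : pvFindIndex (fun l => PySem.Str.startswith l ("class " ++ cn)) lines with _ | i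
  · have h := (pvFindIndex_none_iff _ _).mp hP
    rw [pvLoopSeekNone cn sn lines [] false h]
    simp only [hP]
    simp
  · obtain ⟨u, t, v, hxs, hlen, hu, ht⟩ := pvFindIndex_some _ _ _ hP
    subst hxs
    subst hlen
    rw [pvLoopSeek cn sn u t v [] false hu ht]
    simp only [hP]
    have hdrop : (u ++ t :: v).drop (u.length + 1) = v := by
      rw [show u ++ t :: v = (u ++ [t]) ++ v by simp,
        show u.length + 1 = (u ++ [t]).length by simp, List.drop_left]
    rw [hdrop]
    rcases hQ : pvFindIndex
        (fun l => PySem.Str.startswith l "class " && !(PySem.Str.startswith l ("class " ++ cn))) v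
        with _ | k
    <;> simp only [hQ]
    · have h := (pvFindIndex_none_iff _ _).mp hQ
      rw [pvLoopInsideNone cn sn v ([] ++ u ++ [t]) h]
      simp
    · obtain ⟨w, c, z, hv, hklen, hw, hc⟩ := pvFindIndex_some _ _ _ hQ
      subst hv
      subst hklen
      rw [pvLoopInsideFound cn sn w c z ([] ++ u ++ [t]) hw hc]
      obtain ⟨h1, h2⟩ := pvLoopDone cn sn z ([] ++ u ++ [t] ++ w ++ [sn, c]) false
      rw [h1, h2]
      have htake : (u ++ t :: (w ++ c :: z)).take (u.length + 1 + w.length) = u ++ t :: w := by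
        rw [show u ++ t :: (w ++ c :: z) = (u ++ t :: w) ++ c :: z by simp,
          show u.length + 1 + w.length = (u ++ t :: w).length by simp only [List.length_append, List.length_cons]; omega, List.take_left]
      have hdrop2 : (u ++ t :: (w ++ c :: z)).drop (u.length + 1 + w.length) = c :: z := by
        rw [show u ++ t :: (w ++ c :: z) = (u ++ t :: w) ++ c :: z by simp,
          show u.length + 1 + w.length = (u ++ t :: w).length by simp only [List.length_append, List.length_cons]; omega, List.drop_left]
      rw [htake, hdrop2]
      simp

-- ===== VERDICT (by name: the statement is the Claim_ definition above) =====
theorem insert_into_class_spec : Claim_equal_insert_into_class := by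
  intro content cn sn _
  unfold Spec_insert_into_class insert_into_class insert_into_class_alt
  by_cases hin : PySem.Str.isIn (PySem.Str.strip sn) content = true
  · rw [if_pos hin, if_pos hin]
  · rw [if_neg hin, if_neg hin]
    exact pvMain cn sn (PySem.Str.splitlines content)
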